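-- pv_equiv track=rewrite | github.com/Ajay2812/DSA | data structures/Recurssion/subseq.py | subseqAscii
-- ===== SOURCE A (Python) =====
-- def subseqAscii(p,up):
--     if not up:
--         l=[]
--         l.append(p)
--         return l
--     ch=up[0]
--     first=list(subseqAscii(p,up[1:]))
--     second=list(subseqAscii(p+ch,up[1:]))
--     last=list(subseqAscii(p+str(ord(ch)),up[1:]))
--     first.extend(second)
--     first.extend(last)
--     return first
-- ===== SOURCE B (Python) =====
-- def subseqAscii(p, up):
--     # Iterative cartesian-product build: start from [p]; for each character,
--     # extend every string so far with each of (skip, char, ascii code).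
--     result = [p]
--     for c in up:
--         opts = ('', c, str(ord(c)))
--         result = [s + o for s in result for o in opts]
--     return result
-- ===== Notes on version B (the rewrite author's own statement) =====
-- stated objective: idiomatic
-- what changed: Replaced the three-way recursion with an iterative cartesian-product accumulation: start from [p] and, for each character left to right, extend every string so far with each of ('', char, ascii); same output order since earlier characters vary slowest.
import Mathlib
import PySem

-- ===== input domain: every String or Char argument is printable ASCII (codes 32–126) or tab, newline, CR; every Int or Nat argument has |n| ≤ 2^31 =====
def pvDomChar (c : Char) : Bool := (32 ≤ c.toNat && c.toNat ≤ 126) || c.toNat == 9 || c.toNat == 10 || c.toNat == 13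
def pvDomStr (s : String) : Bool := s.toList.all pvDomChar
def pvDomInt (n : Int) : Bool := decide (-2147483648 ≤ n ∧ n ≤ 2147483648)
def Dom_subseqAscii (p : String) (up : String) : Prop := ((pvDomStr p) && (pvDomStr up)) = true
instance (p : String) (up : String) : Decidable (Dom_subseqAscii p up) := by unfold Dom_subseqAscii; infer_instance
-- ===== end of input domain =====

-- B replaces the three-branch recursion with an iterative cartesian-product accumulation (idiomatic; same output order).


-- ===== PORT A =====
-- recursion over the characters of up (up[0] / up[1:] = head / tail of up.toList)
def subseqAsciiCore (p : String) : List Char → List String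
  | [] => [p]
  | ch :: rest =>
    let first := subseqAsciiCore p rest
    let second := subseqAsciiCore (p ++ String.ofList [ch]) rest
    let last := subseqAsciiCore (p ++ PySem.Int.toStr (ch.toNat : Int)) rest
    first ++ second ++ last

def subseqAscii (p : String) (up : String) : List String :=
  subseqAsciiCore p up.toList

-- ===== PORT B =====
-- iterative accumulation: fold over the characters, extending every string with each option
def subseqAscii_alt (p : String) (up : String) : List String :=
  up.toList.foldl
    (fun result c =>
      result.flatMap (fun s =>
        (["", String.ofList [c], PySem.Int.toStr (c.toNat : Int)] : List String).map (fun o => s ++ o)))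
    [p]

-- ===== PRECONDITION & SPEC =====
def Spec_subseqAscii (p : String) (up : String) (out : List String) : Prop := out = subseqAscii_alt p up
instance (p : String) (up : String) (out : List String) : Decidable (Spec_subseqAscii p up out) := by unfold Spec_subseqAscii; infer_instance

-- ===== CLAIM (what is proved, stated in full; the proofs are below) =====
def Claim_equal_subseqAscii : Prop := ∀ (p : String) (up : String), Dom_subseqAscii p up → Spec_subseqAscii p up (subseqAscii p up)

-- ===== LEMMAS AND PROOFS =====

-- ===== VERDICT (by name: the statement is the Claim_ definition above) =====
theorem foldl_eq_core (cs : List Char) (acc : List String) :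
    List.foldl
      (fun result c =>
        result.flatMap (fun s =>
          (["", String.ofList [c], PySem.Int.toStr (c.toNat : Int)] : List String).map (fun o => s ++ o)))
      acc cs
    = acc.flatMap (fun s => subseqAsciiCore s cs) := by
  induction cs generalizing acc with
  | nil => simp [subseqAsciiCore]
  | cons c cs ih =>
    rw [List.foldl_cons, ih]
    rw [List.flatMap_assoc]
    congr 1
    funext s
    simp [subseqAsciiCore, String.append_empty]

theorem subseqAscii_spec : Claim_equal_subseqAscii := by
  intro p up _
  unfold Spec_subseqAscii subseqAscii subseqAscii_alt
  rw [foldl_eq_core]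
  simp
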